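-- pv_equiv track=rewrite | github.com/qeedquan/challenges | codegolf/the-take-back-counting-algorithm.py | takeback
-- ===== SOURCE A (Python) =====
-- def takeback(a):
--     x = min(a)
--     y = max(a)
--
--     i = 0
--     while i < len(a):
--         f = 0
--         for j in range(i + 1, len(a)):
--             if a[i] >= a[j]:
--                 f = 1
--                 break
--
--         if f != 0:
--             del a[i]
--         else:
--             i += 1
--
--     m = {}
--     for v in a:
--         if x <= v and v <= y:
--             m[v] = True
--
--     return len(m) == y - x + 1
-- ===== SOURCE B (Python) =====
-- def takeback(a):
--     # one right-to-left pass: an element survives A's deletion phase iff it is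
--     # strictly below the minimum of everything to its right; survivors are
--     # strictly increasing and lie in [min(a), max(a)], so the final dict size
--     # is just the survivor count.  (Unlike A, this does not mutate a.)
--     cnt = 0
--     suf = None
--     for v in reversed(a):
--         if suf is None or v < suf:
--             suf = v
--             cnt += 1
--     return cnt == max(a) - min(a) + 1
-- ===== Notes on version B (the rewrite author's own statement) =====
-- stated objective: faster
-- what changed: Replaces the quadratic delete-while-scanning loop plus dict-dedup with a single right-to-left pass counting suffix-minimum survivors and comparing the count to max-min+1 (return value only: A mutates its argument in place, B does not).
import Mathlib
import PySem

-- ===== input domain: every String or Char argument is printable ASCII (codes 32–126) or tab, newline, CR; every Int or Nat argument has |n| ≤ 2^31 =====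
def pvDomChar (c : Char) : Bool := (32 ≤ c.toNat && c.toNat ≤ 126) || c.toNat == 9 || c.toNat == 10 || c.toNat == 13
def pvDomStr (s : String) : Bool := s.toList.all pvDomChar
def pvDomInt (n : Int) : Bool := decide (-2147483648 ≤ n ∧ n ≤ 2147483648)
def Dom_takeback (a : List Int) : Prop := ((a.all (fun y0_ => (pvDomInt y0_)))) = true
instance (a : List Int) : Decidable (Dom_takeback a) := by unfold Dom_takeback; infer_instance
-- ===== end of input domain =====

-- B replaces A's quadratic delete-loop + dict with one right-to-left suffix-minimum
-- pass (faster); equivalence is about the RETURN value only: Python A mutates its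
-- argument in place (del a[i]), B does not.

-- ===== PORT A =====
-- the while-loop: delete a[i] when some later element is ≤ it, else advance i
def takebackLoop (a : List Int) (i : Nat) : List Int :=
  if h : i < a.length then
    -- inner 'for j in range(i+1, len(a))' with break = any
    let f := (PySem.List.pyRange ((i : Int) + 1) (a.length : Int) 1).any
      (fun j => decide (PySem.List.pyGetD a j 0 ≤ PySem.List.pyGetD a (i : Int) 0))
    if f then takebackLoop (a.eraseIdx i) i
    else takebackLoop a (i + 1)
  else a
termination_by a.length - i
decreasing_by
  · simp [List.length_eraseIdx, h]; omega
  · omega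

def takeback (a : List Int) : Bool :=
  match PySem.List.min? a (fun v => v), PySem.List.max? a (fun v => v) with
  | some x, some y =>
    let a' := takebackLoop a 0
    let m : PySem.Dict Int Bool :=
      a'.foldl (fun d v => if x ≤ v ∧ v ≤ y then d.insert v true else d) PySem.Dict.empty
    decide ((m.size : Int) = y - x + 1)
  | _, _ => false   -- Python raises ValueError (min of empty sequence); excluded by Pre_

-- ===== PORT B =====
-- one fold over reversed a: state = (count, current suffix minimum as Option)
def takeback_alt (a : List Int) : Bool :=
  let st := a.reverse.foldl
    (fun (st : Int × Option Int) v =>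
      match st.2 with
      | none => (st.1 + 1, some v)
      | some s => if v < s then (st.1 + 1, some v) else st)
    ((0 : Int), (none : Option Int))
  match PySem.List.max? a (fun v => v) with
  | none => false   -- Python raises ValueError (max of empty sequence); excluded by Pre_
  | some y =>
    match PySem.List.min? a (fun v => v) with
    | none => false
    | some x => decide (st.1 = y - x + 1)

-- ===== PRECONDITION & SPEC =====
-- Python A raises ValueError (min of an empty sequence) on the empty list; B raises there too.
def Pre_takeback (a : List Int) : Prop := a ≠ []
instance (a : List Int) : Decidable (Pre_takeback a) := by unfold Pre_takeback; infer_instance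
def pvWitness_takeback : List Int := [3, 1, 2]

def Spec_takeback (a : List Int) (out : Bool) : Prop := out = takeback_alt a
instance (a : List Int) (out : Bool) : Decidable (Spec_takeback a out) := by unfold Spec_takeback; infer_instance

-- ===== CLAIM (what is proved, stated in full; the proofs are below) =====
def Claim_equal_takeback : Prop := ∀ (a : List Int), Dom_takeback a → Pre_takeback a → Spec_takeback a (takeback a)

-- ===== LEMMAS AND PROOFS =====

-- the survivors of A's deletion phase: elements strictly below everything after them
def surv : List Int → List Int
  | [] => []
  | v :: rest => if rest.all (fun w => decide (v < w)) then v :: surv rest else surv rest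

-- the inner any-check of A's loop, read on the dropped suffix
theorem inner_eq (a : List Int) (i : Nat) (h : i < a.length) :
    ((PySem.List.pyRange ((i : Int) + 1) (a.length : Int) 1).any
      (fun j => decide (PySem.List.pyGetD a j 0 ≤ PySem.List.pyGetD a (i : Int) 0)))
    = !((a.drop (i + 1)).all (fun w => decide (a[i] < w))) := by
  have hm := PySem.List.map_pyGetD_pyRange' a (0:Int) (show (0:Int) ≤ (i:Int)+1 by positivity)
  have he : ((PySem.List.pyRange ((i : Int) + 1) (a.length : Int) 1).any
      (fun j => decide (PySem.List.pyGetD a j 0 ≤ PySem.List.pyGetD a (i : Int) 0)))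
      = ((PySem.List.pyRange ((i : Int) + 1) (a.length : Int) 1).map (fun j => PySem.List.pyGetD a j 0)).any
        (fun w => decide (w ≤ PySem.List.pyGetD a (i : Int) 0)) := by
    rw [List.any_map]; rfl
  rw [he, hm]
  have hi : PySem.List.pyGetD a (i : Int) 0 = a[i] := by
    simp [PySem.List.pyGetD_natCast, List.getD_eq_getElem?_getD, List.getElem?_eq_getElem h]
  rw [hi]
  have ht : ((i:Int)+1).toNat = i + 1 := by omega
  rw [ht, Bool.eq_iff_iff]
  simp only [List.any_eq_true, Bool.not_eq_true', List.all_eq_false, decide_eq_true_eq]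
  constructor
  · rintro ⟨w, hw, hle⟩; exact ⟨w, hw, by omega⟩
  · rintro ⟨w, hw, hle⟩; exact ⟨w, hw, by omega⟩

-- A's while-loop keeps exactly the survivors of the unprocessed suffix
theorem takebackLoop_eq (a : List Int) (i : Nat) :
    takebackLoop a i = a.take i ++ surv (a.drop i) := by
  induction a, i using takebackLoop.induct with
  | case1 a i h f hf ih =>
    rw [takebackLoop]
    simp only [dif_pos h]
    rw [if_pos (by exact hf), ih]
    have hd : a.drop i = a[i] :: a.drop (i+1) := List.drop_eq_getElem_cons h
    have hfalse : (a.drop (i+1)).all (fun w => decide (a[i] < w)) = false := by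
      have hf1 : ((PySem.List.pyRange ((i : Int) + 1) (a.length : Int) 1).any
        (fun j => decide (PySem.List.pyGetD a j 0 ≤ PySem.List.pyGetD a (i : Int) 0))) = true := hf
      rw [inner_eq a i h] at hf1
      simpa using hf1
    have hsurv : surv (a.drop i) = surv (a.drop (i+1)) := by
      rw [hd, surv, if_neg (by simp [hfalse])]
    have her : a.eraseIdx i = a.take i ++ a.drop (i+1) := List.eraseIdx_eq_take_drop_succ a i
    have hlen : (a.take i).length = i := List.length_take_of_le (le_of_lt h)
    rw [her, hsurv]
    rw [List.take_left' hlen, List.drop_left' hlen]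
  | case2 a i h f hf ih =>
    rw [takebackLoop]
    simp only [dif_pos h]
    rw [if_neg (by exact hf), ih]
    have hd : a.drop i = a[i] :: a.drop (i+1) := List.drop_eq_getElem_cons h
    have htrue : (a.drop (i+1)).all (fun w => decide (a[i] < w)) = true := by
      have hf1 : ¬ ((PySem.List.pyRange ((i : Int) + 1) (a.length : Int) 1).any
        (fun j => decide (PySem.List.pyGetD a j 0 ≤ PySem.List.pyGetD a (i : Int) 0))) = true := hf
      rw [inner_eq a i h] at hf1
      simpa using hf1
    rw [hd, surv, if_pos htrue]
    have hts : a.take (i+1) = a.take i ++ [a[i]] := by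
      rw [List.take_add_one, List.getElem?_eq_getElem h]; rfl
    rw [hts, List.append_assoc]
    rfl
  | case3 a i h =>
    rw [takebackLoop]
    simp only [dif_neg h]
    have : a.length ≤ i := le_of_not_gt h
    rw [List.drop_eq_nil_of_le this, List.take_of_length_le this]
    simp [surv]

theorem surv_mem {a : List Int} {v : Int} (h : v ∈ surv a) : v ∈ a := by
  induction a with
  | nil => simp [surv] at h
  | cons w rest ih =>
    rw [surv] at h
    split at h
    · rcases List.mem_cons.mp h with h' | h'
      · simp [h']
      · exact List.mem_cons_of_mem _ (ih h')
    · exact List.mem_cons_of_mem _ (ih h)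

theorem surv_pairwise (a : List Int) : (surv a).Pairwise (· < ·) := by
  induction a with
  | nil => simp [surv]
  | cons v rest ih =>
    rw [surv]
    split
    · rename_i hall
      refine List.Pairwise.cons (fun w hw => ?_) ih
      have := surv_mem hw
      simpa using List.all_eq_true.mp hall w this
    · exact ih

theorem surv_nodup (a : List Int) : (surv a).Nodup :=
  (surv_pairwise a).imp (fun h => ne_of_lt h)

-- min over a cons, via the running-min foldl
theorem foldl_min_cons (t : List Int) : ∀ v w : Int, t.foldl min (min v w) = min v (t.foldl min w) := by
  induction t with
  | nil => intro v w; rfl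
  | cons x t ih =>
    intro v w
    simp only [List.foldl_cons]
    rw [min_assoc, ih]

theorem min?_cons (v : Int) (rest : List Int) (s : Int)
    (h : PySem.List.min? rest (fun y => y) = some s) :
    PySem.List.min? (v :: rest) (fun y => y) = some (min v s) := by
  cases rest with
  | nil => simp [PySem.List.min?] at h
  | cons w t =>
    rw [PySem.List.min?_id_cons] at h ⊢
    simp only [List.foldl_cons]
    rw [foldl_min_cons]
    injection h with h
    rw [h]

-- B's fold state: survivor count and the running (suffix) minimum
theorem fold_eq (a : List Int) :
    a.reverse.foldl
      (fun (st : Int × Option Int) v =>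
        match st.2 with
        | none => (st.1 + 1, some v)
        | some s => if v < s then (st.1 + 1, some v) else st)
      ((0 : Int), (none : Option Int))
    = (((surv a).length : Int), PySem.List.min? a (fun v => v)) := by
  induction a with
  | nil => rfl
  | cons v rest ih =>
    rw [List.reverse_cons, List.foldl_append, ih]
    cases hmin : PySem.List.min? rest (fun y => y) with
    | none =>
      have hnil : rest = [] := (PySem.List.min?_eq_none_iff _ _).mp hmin
      subst hnil
      simp [surv, PySem.List.min?]
    | some s =>
      rw [min?_cons v rest s hmin]
      by_cases hvs : v < s
      · have hall : rest.all (fun w => decide (v < w)) = true := by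
          refine List.all_eq_true.mpr (fun w hw => ?_)
          have := PySem.List.min?_isMin hmin w hw
          simp only [decide_eq_true_eq]
          omega
        rw [surv, if_pos hall]
        simp [hvs, min_eq_left (le_of_lt hvs)]
      · have hsm : s ∈ rest := PySem.List.min?_mem hmin
        have hall : rest.all (fun w => decide (v < w)) = false := by
          refine List.all_eq_false.mpr ⟨s, hsm, by simpa using hvs⟩
        rw [surv, if_neg (by simp [hall])]
        simp [hvs, min_eq_right (le_of_not_gt hvs)]

-- ===== VERDICT (by name: the statement is the Claim_ definition above) =====
theorem takeback_spec : Claim_equal_takeback := by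
  intro a _ hpre
  unfold Spec_takeback
  obtain ⟨x, hx⟩ : ∃ x, PySem.List.min? a (fun v => v) = some x := by
    cases h : PySem.List.min? a (fun v => v) with
    | none => exact absurd ((PySem.List.min?_eq_none_iff _ _).mp h) hpre
    | some x => exact ⟨x, rfl⟩
  obtain ⟨y, hy⟩ : ∃ y, PySem.List.max? a (fun v => v) = some y := by
    cases h : PySem.List.max? a (fun v => v) with
    | none => exact absurd ((PySem.List.max?_eq_none_iff _ _).mp h) hpre
    | some y => exact ⟨y, rfl⟩
  rw [takeback, takeback_alt, hx, hy]
  have hloop : takebackLoop a 0 = surv a := by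
    simpa using takebackLoop_eq a 0
  have hcond : ∀ (d : PySem.Dict Int Bool), ∀ w ∈ surv a,
      (if x ≤ w ∧ w ≤ y then d.insert w true else d) = d.insert w true := by
    intro d w hw
    have hmem := surv_mem hw
    have h1 := PySem.List.min?_isMin hx w hmem
    have h2 := PySem.List.max?_isMax hy w hmem
    rw [if_pos ⟨h1, h2⟩]
  have hfold : (surv a).foldl
      (fun (d : PySem.Dict Int Bool) v => if x ≤ v ∧ v ≤ y then d.insert v true else d)
      PySem.Dict.empty
      = (surv a).foldl (fun d v => d.insert v true) PySem.Dict.empty :=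
    PySem.List.foldl_congr_mem _ _ _ _ (fun d w hw => hcond d w hw)
  have hitems := PySem.Dict.items_foldl_insert_fresh (surv a) (fun v => v) (fun _ => (true : Bool))
      PySem.Dict.empty (fun w _ => PySem.Dict.contains_empty w)
      (by simpa using surv_nodup a)
  have hsize : ((surv a).foldl (fun (d : PySem.Dict Int Bool) v => d.insert v true)
      PySem.Dict.empty).size = (surv a).length := by
    show ((surv a).foldl (fun (d : PySem.Dict Int Bool) v => d.insert v true)
      PySem.Dict.empty).items.length = _
    rw [hitems]
    simp [show (PySem.Dict.empty : PySem.Dict Int Bool).items = [] from rfl]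
  rw [fold_eq a, hx]
  simp only [hloop, hfold, hsize]
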